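-- pv_equiv track=rewrite | github.com/UMBC-CMSC-Hamilton/cmsc201fall23 | final_review_1pm.py | a_distance
-- ===== SOURCE A (Python) =====
-- def a_distance(message):
--     prev_index = -1
--     min_distance = len(message) + 1
--     for i in range(len(message)):
--         if message[i] == 'a':
--             if prev_index == -1:
--                 prev_index = i
--             else:
--                 if i - prev_index < min_distance:
--                     min_distance = i - prev_index
--                 prev_index = i
--
--     return min_distance
-- ===== SOURCE B (Python) =====
-- def a_distance(message):
--     parts = message.split('a')
--     if len(parts) < 3:
--         return len(message) + 1
--     return 1 + min(len(p) for p in parts[1:-1])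
-- ===== Notes on version B (the rewrite author's own statement) =====
-- stated objective: simpler
-- what changed: B computes the answer via message.split('a'): with fewer than three split parts it returns len(message)+1, otherwise 1 plus the minimum length of the inner split segments (the text between consecutive occurrences), replacing A's stateful prev-index/min-distance index scan entirely.
import Mathlib
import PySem

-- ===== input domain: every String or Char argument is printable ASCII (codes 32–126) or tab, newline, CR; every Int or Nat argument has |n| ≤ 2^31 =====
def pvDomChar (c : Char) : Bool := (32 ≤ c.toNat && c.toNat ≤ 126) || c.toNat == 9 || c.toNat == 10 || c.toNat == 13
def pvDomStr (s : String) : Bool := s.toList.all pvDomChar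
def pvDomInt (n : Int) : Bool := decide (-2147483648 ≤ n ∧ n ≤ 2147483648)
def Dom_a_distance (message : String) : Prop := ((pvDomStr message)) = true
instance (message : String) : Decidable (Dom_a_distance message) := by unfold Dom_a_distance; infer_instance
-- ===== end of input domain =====

-- B replaces A's index scan with message.split('a'): the gap between consecutive 'a's is one
-- more than the length of the split segment between them (simpler decomposition; return value only).

-- ===== PORT A =====
def a_distance (message : String) : Int :=
  (((PySem.List.pyRange 0 (PySem.Str.len message) 1).foldl
    (fun (st : Int × Int) i =>
      if (PySem.Str.pyGet? message i).getD ' ' = 'a' then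
        if st.1 = -1 then (i, st.2)
        else (i, if i - st.1 < st.2 then i - st.1 else st.2)
      else st)
    (-1, PySem.Str.len message + 1)) : Int × Int).2

-- ===== PORT B =====
def a_distance_alt (message : String) : Int :=
  -- parts = message.split('a')
  let parts := (PySem.Str.split? message "a").getD []
  -- if len(parts) < 3: return len(message) + 1
  if parts.length < 3 then PySem.Str.len message + 1
  else
    -- return 1 + min(len(p) for p in parts[1:-1])
    1 + (PySem.List.min? ((PySem.List.slice parts (some 1) (some (-1))).map PySem.Str.len)
          (fun x => x)).getD 0   -- the slice is nonempty here, so Python's min does not raise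

-- ===== PRECONDITION & SPEC =====
def Spec_a_distance (message : String) (out : Int) : Prop := out = a_distance_alt message
instance (message : String) (out : Int) : Decidable (Spec_a_distance message out) := by unfold Spec_a_distance; infer_instance

-- ===== CLAIM (what is proved, stated in full; the proofs are below) =====
def Claim_equal_a_distance : Prop := ∀ (message : String), Dom_a_distance message → Spec_a_distance message (a_distance message)

-- ===== LEMMAS AND PROOFS =====

-- ---- proof-side reference objects ----

-- positions of 'a' (as in enumerate-and-filter)
def pvPos (message : String) : List Int :=
  ((PySem.List.enumerate message.toList 0).filter (fun p => p.2 == 'a')).map (fun p => p.1)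

-- structural-recursion model of l.split('a') on List Char
def pvSplit : List Char → List (List Char)
  | [] => [[]]
  | c :: rest =>
    if c = 'a' then [] :: pvSplit rest
    else
      match pvSplit rest with
      | [] => [[c]]      -- unreachable: pvSplit is never []
      | h :: t => (c :: h) :: t

theorem pvSplit_ne_nil (l : List Char) : pvSplit l ≠ [] := by
  cases l with
  | nil => simp [pvSplit]
  | cons c rest =>
    simp only [pvSplit]
    split_ifs
    · simp
    · cases h : pvSplit rest <;> simp

-- splitOn.go with enough fuel computes pvSplit
theorem pv_go_spec (fuel : Nat) (l cur : List Char) (acc : List (List Char))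
    (hf : l.length < fuel) :
    PySem.Chars.splitOn.go ['a'] fuel l cur acc
      = acc.reverse ++ ((cur.reverse ++ (pvSplit l).headI) :: (pvSplit l).tail) := by
  induction l generalizing fuel cur acc with
  | nil =>
    cases fuel with
    | zero => omega
    | succ f => simp [PySem.Chars.splitOn.go, pvSplit]
  | cons c rest ih =>
    cases fuel with
    | zero => omega
    | succ f =>
      by_cases hc : c = 'a'
      · have hpre : List.isPrefixOf ['a'] (c :: rest) = true := by
          simp [List.isPrefixOf, hc]
        rw [PySem.Chars.splitOn.go]
        simp only [hpre, if_pos]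
        have : List.drop (['a'] : List Char).length (c :: rest) = rest := by simp
        rw [this, ih f [] (cur.reverse :: acc) (by simpa using Nat.lt_of_succ_lt_succ hf)]
        rcases hsp : pvSplit rest with _ | ⟨h, t⟩
        · exact absurd hsp (pvSplit_ne_nil rest)
        · simp [pvSplit, hc, hsp]
      · have hpre : List.isPrefixOf ['a'] (c :: rest) = false := by
          simp [List.isPrefixOf]; exact fun h => absurd h.symm hc
        rw [PySem.Chars.splitOn.go]
        simp only [hpre, Bool.false_eq_true, if_false]
        rw [ih f (c :: cur) acc (Nat.lt_of_succ_lt_succ hf)]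
        rcases hsp : pvSplit rest with _ | ⟨h, t⟩
        · exact absurd hsp (pvSplit_ne_nil rest)
        · simp [pvSplit, hc, hsp]

theorem pv_splitOn_eq (l : List Char) : PySem.Chars.splitOn l ['a'] = pvSplit l := by
  rw [PySem.Chars.splitOn, pv_go_spec (l.length + 1) l [] [] (by omega)]
  rcases hsp : pvSplit l with _ | ⟨h, t⟩
  · exact absurd hsp (pvSplit_ne_nil l)
  · simp

-- (x :: t).dropLast.tail = t.dropLast
theorem pv_dropLast_tail {α : Type} (x : α) (t : List α) :
    ((x :: t).dropLast).tail = t.dropLast := by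
  cases t <;> simp

-- positions as enumerate-filter over a suffix, with offset
def pvPosFrom (l : List Char) (s : Int) : List Int :=
  ((PySem.List.enumerate l s).filter (fun p => p.2 == 'a')).map (fun p => p.1)

theorem pvPosFrom_nil (s : Int) : pvPosFrom [] s = [] := by
  simp [pvPosFrom, PySem.List.enumerate_nil]

theorem pvPosFrom_cons (c : Char) (rest : List Char) (s : Int) :
    pvPosFrom (c :: rest) s
      = if c = 'a' then s :: pvPosFrom rest (s + 1) else pvPosFrom rest (s + 1) := by
  by_cases hc : c = 'a' <;> simp [pvPosFrom, PySem.List.enumerate_cons, hc]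

-- the split↔positions invariant
theorem pv_split_pos (l : List Char) (s : Int) :
    (pvSplit l).length = (pvPosFrom l s).length + 1
    ∧ (((pvSplit l).dropLast).tail).map (fun p => (p.length : Int) + 1)
        = ((pvPosFrom l s).zip ((pvPosFrom l s).drop 1)).map (fun q => q.2 - q.1)
    ∧ (∀ q ∈ (pvPosFrom l s).head?, q = s + (((pvSplit l).headI).length : Int)) := by
  induction l generalizing s with
  | nil => refine ⟨by simp [pvSplit, pvPosFrom_nil], by simp [pvSplit, pvPosFrom_nil], ?_⟩
           simp [pvPosFrom_nil]
  | cons c rest ih =>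
    obtain ⟨ih1, ih2, ih3⟩ := ih (s + 1)
    rcases hsp : pvSplit rest with _ | ⟨h, t⟩
    · exact absurd hsp (pvSplit_ne_nil rest)
    by_cases hc : c = 'a'
    · have hl : pvSplit (c :: rest) = [] :: h :: t := by simp [pvSplit, hc, hsp]
      have hp : pvPosFrom (c :: rest) s = s :: pvPosFrom rest (s + 1) := by
        simp [pvPosFrom_cons, hc]
      rw [hl, hp]
      refine ⟨by simp only [List.length_cons] at ih1 ⊢; rw [hsp] at ih1; simp at ih1; omega, ?_, ?_⟩
      · rw [pv_dropLast_tail]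
        rcases hpr : pvPosFrom rest (s + 1) with _ | ⟨q, qs⟩
        · -- no further 'a': parts of rest has length 1, so t = []
          rw [hsp, hpr] at ih1; simp at ih1
          subst ih1; simp
        · have hq : q = (s + 1) + (h.length : Int) := by
            have := ih3 q (by rw [hpr]; rfl)
            rw [hsp] at this; simpa using this
          rcases ht : t with _ | ⟨h2, t2⟩
          · rw [hsp, hpr, ht] at ih1; simp at ih1
          · rw [← ht]
            have hdl : (h :: t).dropLast = h :: t.dropLast := by rw [ht]; simp
            rw [hdl]
            simp only [List.drop_one, List.tail_cons, List.zip_cons_cons, List.map_cons,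
              List.cons.injEq]
            constructor
            · omega
            · have := ih2
              rw [hsp, pv_dropLast_tail, hpr] at this
              simp only [List.drop_one, List.tail_cons] at this
              exact this
      · intro q hq
        simp at hq; subst hq; simp
    · have hl : pvSplit (c :: rest) = (c :: h) :: t := by simp [pvSplit, hc, hsp]
      have hp : pvPosFrom (c :: rest) s = pvPosFrom rest (s + 1) := by
        simp [pvPosFrom_cons, hc]
      rw [hl, hp]
      refine ⟨?_, ?_, ?_⟩
      · rw [hsp] at ih1; simpa using ih1
      · rw [pv_dropLast_tail]
        have := ih2; rw [hsp, pv_dropLast_tail] at this; exact this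
      · intro q hq
        have := ih3 q hq
        rw [hsp] at this; simp at this ⊢; omega

-- ---- A-side: fold over range = min-fold over adjacent position differences ----

theorem pv_foldl_range_enum {σ : Type} (l : List Char) (f : σ → Int → Char → σ) (g : Int → Char)
    (s : Int) (init : σ)
    (h : ∀ k : Nat, (hk : k < l.length) → g (s + k) = l[k]) :
    (PySem.List.pyRange s (s + l.length) 1).foldl (fun st i => f st i (g i)) init
      = (PySem.List.enumerate l s).foldl (fun st p => f st p.1 p.2) init := by
  induction l generalizing s init with
  | nil => simp [PySem.List.pyRange_one_eq_nil le_rfl, PySem.List.enumerate_nil]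
  | cons c t ih =>
    rw [PySem.List.pyRange_one_cons (by simp), PySem.List.enumerate_cons]
    simp only [List.foldl_cons]
    have hc : g s = c := by simpa using h 0 (by simp)
    rw [hc]
    have : (s + ((c :: t).length : Int)) = (s + 1) + (t.length : Int) := by push_cast [List.length_cons]; ring
    rw [this]
    exact ih (s + 1) _ (fun k hk => by
      have := h (k + 1) (by simpa using Nat.succ_lt_succ hk)
      simpa [add_assoc, add_comm, add_left_comm] using this)

theorem pv_foldl_filter_map {α β σ : Type} (L : List α) (pr : α → Bool) (h : α → β)
    (g : σ → β → σ) (init : σ) :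
    L.foldl (fun st x => if pr x then g st (h x) else st) init
      = ((L.filter pr).map h).foldl g init := by
  induction L generalizing init with
  | nil => rfl
  | cons x t ih =>
    by_cases hp : pr x
    · simp [hp, ih]
    · simp [hp, ih]

def pvStep (st : Int × Int) (i : Int) : Int × Int :=
  if st.1 = -1 then (i, st.2)
  else (i, if i - st.1 < st.2 then i - st.1 else st.2)

theorem pv_fold_step (xs : List Int) (p m : Int) (hp : 0 ≤ p) (hxs : ∀ x ∈ xs, 0 ≤ x) :
    (xs.foldl pvStep (p, m)).2
      = (((p :: xs).zip xs).map (fun q => q.2 - q.1)).foldl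
          (fun acc d => if d < acc then d else acc) m := by
  induction xs generalizing p m with
  | nil => rfl
  | cons q t ih =>
    have hq : 0 ≤ q := hxs q (by simp)
    have hstep : pvStep (p, m) q = (q, if q - p < m then q - p else m) := by
      simp [pvStep]; omega
    simp only [List.foldl_cons, hstep, List.zip_cons_cons, List.map_cons]
    exact ih q _ hq (fun x hx => hxs x (by simp [hx]))

theorem pv_min_comm_fold (t : List Int) (d X : Int) :
    t.foldl min (min X d) = min X (t.foldl min d) := by
  induction t generalizing d with
  | nil => rfl
  | cons e ys ih =>
    simp only [List.foldl_cons, min_assoc]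
    exact ih (min d e)

theorem pv_foldl_min_le (t : List Int) (d : Int) : t.foldl min d ≤ d := by
  induction t generalizing d with
  | nil => simp
  | cons e ys ih => exact le_trans (ih (min d e)) (min_le_left d e)

theorem pv_if_min (t : List Int) (m : Int) :
    t.foldl (fun acc d => if d < acc then d else acc) m = t.foldl min m := by
  have : (fun (acc d : Int) => if d < acc then d else acc) = min := by
    funext acc d
    simp only [min_def]
    split_ifs <;> omega
  rw [this]

theorem pv_fold_min_map_succ (L : List Int) (x : Int) :
    (L.map (fun y => y + 1)).foldl min (x + 1) = (L.foldl min x) + 1 := by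
  induction L generalizing x with
  | nil => rfl
  | cons y t ih =>
    simp only [List.map_cons, List.foldl_cons]
    rw [show min (x + 1) (y + 1) = (min x y) + 1 by omega]
    exact ih (min x y)

theorem pv_pos_bound (message : String) (x : Int) (hx : x ∈ pvPos message) :
    0 ≤ x ∧ x < (message.toList.length : Int) := by
  rcases List.mem_map.1 hx with ⟨p, hp, rfl⟩
  have hp' : p ∈ PySem.List.enumerate message.toList 0 := List.mem_of_mem_filter hp
  have hm : p.1 ∈ (PySem.List.enumerate message.toList 0).map (fun q => q.1) :=
    List.mem_map_of_mem hp'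
  rw [PySem.List.map_fst_enumerate] at hm
  have := PySem.List.mem_pyRange_one.1 hm
  omega

-- A's value, in closed form over the positions
theorem pv_a_closed (message : String) :
    a_distance message
      = match pvPos message with
        | [] => (message.toList.length : Int) + 1
        | p :: xs =>
            (((p :: xs).zip xs).map (fun q => q.2 - q.1)).foldl min
              ((message.toList.length : Int) + 1) := by
  unfold a_distance
  have hlen : PySem.Str.len message = (message.toList.length : Int) := by
    simp [PySem.Str.len_eq]
  rw [hlen]
  have e1 := pv_foldl_range_enum (σ := Int × Int) message.toList
      (fun st i c => if c = 'a' then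
        (if st.1 = -1 then (i, st.2)
         else (i, if i - st.1 < st.2 then i - st.1 else st.2)) else st)
      (fun i => (PySem.Str.pyGet? message i).getD ' ') 0
      (-1, (message.toList.length : Int) + 1)
      (fun k hk => by simp [List.getElem?_eq_getElem hk])
  simp only [zero_add] at e1
  rw [e1]
  have e2 : (fun (st : Int × Int) (p : Int × Char) =>
        if p.2 = 'a' then
          (if st.1 = -1 then (p.1, st.2)
           else (p.1, if p.1 - st.1 < st.2 then p.1 - st.1 else st.2)) else st)
      = (fun (st : Int × Int) (p : Int × Char) => if (p.2 == 'a') then pvStep st p.1 else st) := by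
    funext st p
    simp [pvStep]
  simp only [e2]
  rw [pv_foldl_filter_map (PySem.List.enumerate message.toList 0)
        (fun p => p.2 == 'a') (fun p => p.1) pvStep]
  have hpvpos : ((PySem.List.enumerate message.toList 0).filter (fun p => p.2 == 'a')).map
      (fun p => p.1) = pvPos message := rfl
  rw [hpvpos]
  rcases hpos : pvPos message with _ | ⟨p, xs⟩
  · rfl
  · have hp := pv_pos_bound message p (by rw [hpos]; exact List.mem_cons_self ..)
    have hxs : ∀ x ∈ xs, 0 ≤ x := by
      intro x hx
      exact (pv_pos_bound message x (by rw [hpos]; exact List.mem_cons_of_mem _ hx)).1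
    rw [List.foldl_cons]
    have hfirst : pvStep (-1, (message.toList.length : Int) + 1) p
        = (p, (message.toList.length : Int) + 1) := by simp [pvStep]
    rw [hfirst, pv_fold_step xs p _ hp.1 hxs, pv_if_min]


theorem pv_a_closed_nil (message : String) (h : pvPos message = []) :
    a_distance message = (message.toList.length : Int) + 1 := by
  have := pv_a_closed message
  rw [h] at this
  exact this

theorem pv_a_closed_cons (message : String) (p : Int) (xs : List Int)
    (h : pvPos message = p :: xs) :
    a_distance message
      = (((p :: xs).zip xs).map (fun q => q.2 - q.1)).foldl min
          ((message.toList.length : Int) + 1) := by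
  have := pv_a_closed message
  rw [h] at this
  exact this

-- ===== VERDICT (by name: the statement is the Claim_ definition above) =====
theorem a_distance_spec : Claim_equal_a_distance := by
  intro message _
  unfold Spec_a_distance a_distance_alt
  -- normalise B's parts to pvSplit
  have hsplit : PySem.Str.split? message "a"
      = some ((pvSplit message.toList).map String.ofList) := by
    rw [PySem.Str.split?]
    simp [PySem.Chars.split?, pv_splitOn_eq]
  rw [hsplit]
  simp only [Option.getD_some]
  rcases hsp : pvSplit message.toList with _ | ⟨h, t⟩
  · exact absurd hsp (pvSplit_ne_nil message.toList)
  obtain ⟨h1, h2, _⟩ := pv_split_pos message.toList 0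
  have hposf : pvPosFrom message.toList 0 = pvPos message := rfl
  rw [hposf] at h1 h2
  rcases hpos : pvPos message with _ | ⟨p, xs⟩
  · -- no 'a' at all: pvSplit has length 1, parts has length 1 < 3
    rw [hsp, hpos] at h1
    simp at h1
    subst h1
    rw [pv_a_closed_nil message hpos]
    simp [PySem.Str.len_eq]
  rcases hxs : xs with _ | ⟨q, qs⟩
  · -- exactly one 'a': pvSplit has length 2 < 3
    subst hxs
    rw [hsp, hpos] at h1
    simp at h1
    rw [pv_a_closed_cons message p [] hpos]
    have hlen2 : ((h :: t).map String.ofList).length = 2 := by simp [h1]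
    rw [if_pos (by rw [hlen2]; omega)]
    simp [PySem.Str.len_eq]
  · -- at least two 'a's
    subst hxs
    rw [hsp, hpos] at h1 h2
    simp only [List.drop_one, List.tail_cons] at h2
    simp only [List.length_cons] at h1
    rw [pv_a_closed_cons message p (q :: qs) hpos]
    have hlenp : ((h :: t).map String.ofList).length = qs.length + 3 := by
      simp; omega
    rw [if_neg (by rw [hlenp]; omega)]
    -- the slice parts[1:-1] is parts.tail.dropLast, i.e. the inner segments
    have hslice : PySem.List.slice ((h :: t).map String.ofList) (some 1) (some (-1))
        = (t.dropLast).map String.ofList := by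
      have hc1 : PySem.List.clampIdx ((h :: t).map String.ofList).length (1 : Int) = 1 := by
        simp [PySem.List.clampIdx]
      have hc2 : PySem.List.clampIdx ((h :: t).map String.ofList).length (-1 : Int)
          = t.length := by
        rw [PySem.List.clampIdx_neg_one]; simp
      simp only [PySem.List.slice, hc1, hc2]
      rw [show List.drop 1 ((h :: t).map String.ofList) = t.map String.ofList by simp]
      rw [List.dropLast_eq_take, List.map_take]
    rw [hslice]
    -- lengths of the inner parts
    have hmaplen : ((t.dropLast).map String.ofList).map PySem.Str.len
        = (t.dropLast).map (fun cs => (cs.length : Int)) := by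
      simp [Function.comp_def, PySem.Str.len_eq]
    rw [hmaplen]
    -- diffs = lens.map (+1)
    have hdt : ((h :: t).dropLast).tail = t.dropLast := pv_dropLast_tail h t
    rw [hdt] at h2
    have hdiffs : (((p :: q :: qs).zip (q :: qs)).map (fun r => r.2 - r.1))
        = ((t.dropLast).map (fun cs => (cs.length : Int))).map (fun y => y + 1) := by
      rw [← h2, List.map_map]; rfl
    rw [hdiffs]
    -- the inner-lengths list is nonempty
    rcases hlens : (t.dropLast).map (fun cs => (cs.length : Int)) with _ | ⟨l0, ls⟩
    · exfalso
      have hnil : t.dropLast = [] := by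
        cases hdl : t.dropLast with
        | nil => rfl
        | cons a b => rw [hdl] at hlens; simp at hlens
      have ht0 : t.dropLast.length = 0 := by rw [hnil]; rfl
      rw [List.length_dropLast] at ht0
      omega
    · -- B's min? on the nonempty list
      rw [hlens, PySem.List.min?_id_cons, Option.getD_some]
      -- A's fold: drop the len+1 sentinel, then shift by one
      rw [List.map_cons, List.foldl_cons]
      rw [pv_min_comm_fold, pv_fold_min_map_succ]
      -- bound: l0 + 1 is a distance between two positions, hence at most the length
      have hl0 : l0 + 1 ≤ (message.toList.length : Int) := by
        have hm : (l0 + 1) ∈ ((p :: q :: qs).zip (q :: qs)).map (fun r => r.2 - r.1) := by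
          rw [hdiffs, hlens]; simp
        rcases List.mem_map.1 hm with ⟨r, hr, hval⟩
        have h2nd : r.2 ∈ pvPos message := by
          have := (List.of_mem_zip hr).2
          rw [hpos]; exact List.mem_cons_of_mem _ this
        have h1st : r.1 ∈ pvPos message := by
          have := (List.of_mem_zip hr).1
          rw [hpos]; exact this
        have hb2 := pv_pos_bound message r.2 h2nd
        have hb1 := pv_pos_bound message r.1 h1st
        omega
      have hle : (ls.foldl min l0) + 1 ≤ (message.toList.length : Int) + 1 := by
        have := pv_foldl_min_le ls l0
        omega
      rw [min_eq_right hle]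
      omega
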